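-- pv_equiv track=rewrite | github.com/HumbertoBPF/LeetCodePython | SolutionLeetCode405.py | from_hex_list_to_str
-- ===== SOURCE A (Python) =====
-- NUM_HEX = 8
--
-- def from_hex_list_to_str(hex_list):
--     hex_repr = ""
--     is_leading_zero = True
--
--     for i in range(NUM_HEX):
--         if hex_list[i] != "0":
--             is_leading_zero = False
--
--         if not is_leading_zero:
--             hex_repr += hex_list[i]
--
--     return hex_repr
-- ===== SOURCE B (Python) =====
-- NUM_HEX = 8
--
-- def from_hex_list_to_str(hex_list):
--     chars = [hex_list[i] for i in range(NUM_HEX)]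
--     start = next((i for i, c in enumerate(chars) if c != "0"), NUM_HEX)
--     return "".join(chars[start:])
-- ===== Notes on version B (the rewrite author's own statement) =====
-- stated objective: alternative
-- what changed: Replaces A's single accumulate-with-leading-zero-flag loop by materialising the 8 elements, locating the first non-"0" boundary index, and joining the suffix slice.
import Mathlib
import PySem

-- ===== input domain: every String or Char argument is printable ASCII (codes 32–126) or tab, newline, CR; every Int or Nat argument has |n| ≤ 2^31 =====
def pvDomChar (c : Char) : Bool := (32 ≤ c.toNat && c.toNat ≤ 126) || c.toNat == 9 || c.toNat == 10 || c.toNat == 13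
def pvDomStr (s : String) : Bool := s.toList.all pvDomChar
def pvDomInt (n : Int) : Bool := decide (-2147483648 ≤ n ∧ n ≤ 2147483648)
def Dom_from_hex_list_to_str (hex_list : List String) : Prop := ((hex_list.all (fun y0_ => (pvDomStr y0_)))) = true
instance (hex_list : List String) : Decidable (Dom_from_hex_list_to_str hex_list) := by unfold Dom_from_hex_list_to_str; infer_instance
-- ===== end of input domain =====

-- B replaces A's accumulate-with-leading-zero-flag loop by materialising the 8 elements,
-- finding the first non-"0" boundary and joining the suffix (different decomposition, same cost).

-- ===== PORT A =====
-- loop body of A: updates (hex_repr, is_leading_zero) for one element hex_list[i]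
def pvStep (st : String × Bool) (x : String) : String × Bool :=
  let is_leading_zero := if x ≠ "0" then false else st.2
  ((if is_leading_zero then st.1 else st.1 ++ x), is_leading_zero)

def from_hex_list_to_str (hex_list : List String) : String :=
  ((PySem.List.pyRange 0 8).foldl
    (fun st i => pvStep st (PySem.List.pyGetD hex_list i ""))
    ("", true)).1

-- ===== PORT B =====
-- port of B's `next((i for i, c in enumerate(chars) if c != "0"), NUM_HEX)`:
-- index of the first element ≠ "0", or the length if none
def pvFindStart : List String → Nat
  | [] => 0
  | c :: rest => if c ≠ "0" then 0 else 1 + pvFindStart rest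

def from_hex_list_to_str_alt (hex_list : List String) : String :=
  let chars := (PySem.List.pyRange 0 8).map (fun i => PySem.List.pyGetD hex_list i "")
  let start := pvFindStart chars
  PySem.Str.join "" (PySem.List.slice chars (some (start : Int)) none)

-- ===== PRECONDITION & SPEC =====
-- A raises IndexError (hex_list[i] for i < 8) on lists shorter than 8; exactly those are excluded.
def Pre_from_hex_list_to_str (hex_list : List String) : Prop := 8 ≤ hex_list.length
instance (hex_list : List String) : Decidable (Pre_from_hex_list_to_str hex_list) := by unfold Pre_from_hex_list_to_str; infer_instance
def pvWitness_from_hex_list_to_str : List String := ["0", "0", "1", "a", "0", "ff", "3", "e"]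

def Spec_from_hex_list_to_str (hex_list : List String) (out : String) : Prop := out = from_hex_list_to_str_alt hex_list
instance (hex_list : List String) (out : String) : Decidable (Spec_from_hex_list_to_str hex_list out) := by unfold Spec_from_hex_list_to_str; infer_instance

-- ===== CLAIM (what is proved, stated in full; the proofs are below) =====
def Claim_equal_from_hex_list_to_str : Prop := ∀ (hex_list : List String), Dom_from_hex_list_to_str hex_list → Pre_from_hex_list_to_str hex_list → Spec_from_hex_list_to_str hex_list (from_hex_list_to_str hex_list)

-- ===== LEMMAS AND PROOFS =====

theorem join_empty_nil : PySem.Str.join "" [] = "" := by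
  apply String.toList_injective
  simp [PySem.Str.join, PySem.Chars.join, List.intercalate]

theorem join_empty_cons (x : String) (c : List String) :
    PySem.Str.join "" (x :: c) = x ++ PySem.Str.join "" c := by
  apply String.toList_injective
  simp [PySem.Str.join, PySem.Chars.join, List.intercalate]
  cases c <;> simp

-- once the flag is false, A's loop appends every remaining element
theorem foldl_pvStep_false (c : List String) (rep : String) :
    c.foldl pvStep (rep, false) = (rep ++ PySem.Str.join "" c, false) := by
  induction c generalizing rep with
  | nil => simp [join_empty_nil]
  | cons x c ih =>
    simp only [List.foldl_cons, pvStep, ite_self, Bool.false_eq_true, ite_false]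
    rw [ih, join_empty_cons, String.append_assoc]

-- A's whole loop computes the join of the suffix after the first non-"0" element
theorem foldl_pvStep_eq_join_drop (c : List String) :
    (c.foldl pvStep ("", true)).1 = PySem.Str.join "" (c.drop (pvFindStart c)) := by
  induction c with
  | nil => simp [pvFindStart, join_empty_nil]
  | cons x c ih =>
    by_cases hx : x = "0"
    · rw [show pvFindStart (x :: c) = 1 + pvFindStart c from by simp [pvFindStart, hx],
        Nat.add_comm, List.drop_succ_cons, List.foldl_cons,
        show pvStep ("", true) x = ("", true) from by simp [pvStep, hx]]
      exact ih
    · rw [show pvFindStart (x :: c) = 0 from by simp [pvFindStart, hx], List.drop_zero,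
        List.foldl_cons,
        show pvStep ("", true) x = ("" ++ x, false) from by simp [pvStep, hx],
        foldl_pvStep_false, join_empty_cons]
      simp

theorem pyGetD_take_eight (hex_list : List String) (h : 8 ≤ hex_list.length)
    {i : Int} (hi : i ∈ PySem.List.pyRange 0 8) :
    PySem.List.pyGetD hex_list i "" = PySem.List.pyGetD (hex_list.take 8) i "" := by
  obtain ⟨h0, h8⟩ := PySem.List.mem_pyRange_one.mp hi
  rw [PySem.List.pyGetD_eq_getElem _ _ h0 (by omega),
    PySem.List.pyGetD_eq_getElem _ _ h0 (by rw [List.length_take, Nat.min_eq_left h]; exact_mod_cast h8)]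
  exact (List.getElem_take).symm

-- ===== VERDICT (by name: the statement is the Claim_ definition above) =====
theorem from_hex_list_to_str_spec : Claim_equal_from_hex_list_to_str := by
  intro hex_list _ hpre
  have hpre' : 8 ≤ hex_list.length := hpre
  unfold Spec_from_hex_list_to_str from_hex_list_to_str from_hex_list_to_str_alt
  have hlen : (hex_list.take 8).length = 8 := by simp; omega
  rw [PySem.List.foldl_congr_mem _ _
        (fun st i => pvStep st (PySem.List.pyGetD (hex_list.take 8) i "")) _
        (fun acc x hx => by rw [pyGetD_take_eight hex_list hpre' hx]),
      List.map_congr_left (fun i hi => pyGetD_take_eight hex_list hpre' hi),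
      show (PySem.List.pyRange 0 8) = PySem.List.pyRange 0 ((hex_list.take 8).length : Int) from by rw [hlen]; norm_num]
  simp only [PySem.List.foldl_pyRange_zero_pyGetD', PySem.List.map_pyGetD_pyRange_zero',
    PySem.List.slice_from_natCast]
  exact foldl_pvStep_eq_join_drop _
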